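-- pv_equiv track=rewrite | github.com/kris-s/learn | advent of code/2017.py | day_four
-- ===== SOURCE A (Python) =====
-- def day_four(passphrases):
--     valid = 0
--     for phrase in passphrases.split('\n'):
--         words = phrase.split()
--         word_set = set(words)
--         if not words:
--             continue
--         if len(words) == len(word_set):
--             valid += 1
--     return valid
-- ===== SOURCE B (Python) =====
-- def day_four(passphrases):
--     def distinct_adjacent(ws):
--         if len(ws) < 2:
--             return True
--         return ws[0] != ws[1] and distinct_adjacent(ws[1:])
--
--     def go(lines):
--         if not lines:
--             return 0
--         rest = go(lines[1:])
--         words = lines[0].split()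
--         if not words:
--             return rest
--         if distinct_adjacent(sorted(words)):
--             return rest + 1
--         return rest
--
--     return go(passphrases.split('\n'))
-- ===== Notes on version B (the rewrite author's own statement) =====
-- stated objective: alternative
-- what changed: Replaces A's iterative accumulator loop with a set-size comparison per line by a recursive back-to-front count over the lines, each line validated by sorting its words and recursively checking that no two adjacent sorted words are equal.
import Mathlib
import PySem

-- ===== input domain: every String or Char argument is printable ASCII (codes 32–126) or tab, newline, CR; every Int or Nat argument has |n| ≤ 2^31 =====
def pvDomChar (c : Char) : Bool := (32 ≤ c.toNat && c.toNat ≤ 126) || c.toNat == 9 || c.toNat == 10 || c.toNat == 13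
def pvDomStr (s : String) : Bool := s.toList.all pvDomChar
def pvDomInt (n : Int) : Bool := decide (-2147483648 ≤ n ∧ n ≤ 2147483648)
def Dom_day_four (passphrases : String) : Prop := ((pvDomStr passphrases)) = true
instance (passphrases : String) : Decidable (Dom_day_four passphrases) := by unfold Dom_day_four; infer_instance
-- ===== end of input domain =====

-- B replaces A's iterative loop + per-line set-size test with a recursive back-to-front
-- count whose per-line test sorts the words and recursively compares adjacent pairs
-- (alternative algorithm, similar cost).

-- ===== PORT A =====
def day_four (passphrases : String) : Int :=
  ((PySem.Str.split? passphrases "\n").getD []).foldl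
    (fun valid phrase =>
      let words := PySem.Str.split₀ phrase
      let word_set := PySem.Set.ofList words
      if words = [] then valid
      else if (words.length : Int) = PySem.Set.len word_set then valid + 1
      else valid)
    0

-- ===== PORT B =====
-- distinct_adjacent: ws shorter than 2 → True, else ws[0] != ws[1] and recurse on ws[1:]
def pvDistinctAdj : List String → Bool
  | a :: b :: t => (a != b) && pvDistinctAdj (b :: t)
  | _ => true

-- go: recursion over the list of lines, counting back-to-front
def pvGo : List String → Int
  | [] => 0
  | phrase :: rest =>
      let r := pvGo rest
      let words := PySem.Str.split₀ phrase
      if words = [] then r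
      else if pvDistinctAdj (PySem.List.sorted words (fun w => w) false) then r + 1
      else r

def day_four_alt (passphrases : String) : Int :=
  pvGo ((PySem.Str.split? passphrases "\n").getD [])

-- ===== PRECONDITION & SPEC =====
def Spec_day_four (passphrases : String) (out : Int) : Prop := out = day_four_alt passphrases
instance (passphrases : String) (out : Int) : Decidable (Spec_day_four passphrases out) := by unfold Spec_day_four; infer_instance

-- ===== CLAIM (what is proved, stated in full; the proofs are below) =====
def Claim_equal_day_four : Prop := ∀ (passphrases : String), Dom_day_four passphrases → Spec_day_four passphrases (day_four passphrases)

-- ===== LEMMAS AND PROOFS =====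

-- len(set(xs)) == len(xs) iff xs has no duplicates
theorem pv_ofList_length_iff_nodup {α : Type} [BEq α] [LawfulBEq α] (xs : List α) :
    (PySem.Set.ofList xs).length = xs.length ↔ xs.Nodup := by
  constructor
  · intro h
    by_contra hnd
    have key : ∀ (ys : List α), ¬ ys.Nodup → (PySem.Set.ofList ys).length < ys.length := by
      intro ys
      induction ys with
      | nil => intro h; exact absurd List.nodup_nil h
      | cons x t ih =>
        intro hnd'
        rw [PySem.Set.ofList_cons]
        by_cases hx : x ∈ t
        · have h1 : ((PySem.Set.ofList t).discard x).length < (PySem.Set.ofList t).length := by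
            apply List.length_filter_lt_length_iff_exists.mpr
            refine ⟨x, ?_, by simp⟩
            exact (PySem.Set.mem_ofList t x).mpr hx
          have h2 := PySem.Set.length_ofList_le t
          simp only [List.length_cons]
          omega
        · have ht : ¬ t.Nodup := by
            intro hn; exact hnd' (List.nodup_cons.mpr ⟨hx, hn⟩)
          have h1 := ih ht
          have h2 : ((PySem.Set.ofList t).discard x).length ≤ (PySem.Set.ofList t).length :=
            List.length_filter_le _ _
          simp only [List.length_cons]
          omega
    exact absurd h (Nat.ne_of_lt (key xs hnd))
  · intro h
    rw [PySem.Set.ofList_eq_self_of_nodup xs h]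

-- pvDistinctAdj is IsChain (· ≠ ·)
theorem pv_distinctAdj_iff_chain (ws : List String) :
    pvDistinctAdj ws = true ↔ ws.IsChain (· ≠ ·) := by
  induction ws with
  | nil => simp [pvDistinctAdj]
  | cons a t ih =>
    cases t with
    | nil => simp [pvDistinctAdj]
    | cons b u =>
      rw [pvDistinctAdj, List.isChain_cons_cons, Bool.and_eq_true, bne_iff_ne, ih]

-- a ≤-pairwise list whose adjacent elements differ is an increasing chain
theorem pv_chain_lt_of_pairwise_le (ws : List String)
    (hle : ws.Pairwise (· ≤ ·)) (hne : ws.IsChain (· ≠ ·)) : ws.IsChain (· < ·) := by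
  induction ws with
  | nil => simp
  | cons a t ih =>
    cases t with
    | nil => simp
    | cons b u =>
      rw [List.isChain_cons_cons] at hne ⊢
      rw [List.pairwise_cons] at hle
      exact ⟨lt_of_le_of_ne (hle.1 b (by simp)) hne.1, ih hle.2 hne.2⟩

-- for the sorted list, IsChain (· ≠ ·) iff the original word list is duplicate-free
theorem pv_sorted_chain_iff_nodup (words : List String) :
    (PySem.List.sorted words (fun w => w) false).IsChain (· ≠ ·) ↔ words.Nodup := by
  set ws := PySem.List.sorted words (fun w => w) false with hws
  have hperm : ws.Perm words := PySem.List.sorted_perm words (fun w => w) false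
  have hle : ws.Pairwise (· ≤ ·) := by
    simpa using PySem.List.sorted_pairwise words (fun w => w)
  constructor
  · intro hch
    have hlt : ws.IsChain (· < ·) := pv_chain_lt_of_pairwise_le ws hle hch
    have : ws.Pairwise (· < ·) := List.isChain_iff_pairwise.mp hlt
    exact hperm.nodup_iff.mp (this.imp fun h => ne_of_lt h)
  · intro hnd
    exact ((hperm.nodup_iff.mpr hnd)).isChain

-- A's fold over the lines, from any accumulator, equals accumulator plus B's recursive count
theorem pv_fold_eq_go (lines : List String) : ∀ (v : Int),
    lines.foldl
      (fun valid phrase =>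
        let words := PySem.Str.split₀ phrase
        let word_set := PySem.Set.ofList words
        if words = [] then valid
        else if (words.length : Int) = PySem.Set.len word_set then valid + 1
        else valid)
      v = v + pvGo lines := by
  induction lines with
  | nil => intro v; simp [pvGo]
  | cons phrase rest ih =>
    intro v
    rw [List.foldl_cons]
    simp only [pvGo]
    set words := PySem.Str.split₀ phrase with hw
    by_cases hnil : words = []
    · simp only [hnil, if_pos trivial, ih]
    · simp only [if_neg hnil]
      have hA : ((words.length : Int) = PySem.Set.len (PySem.Set.ofList words)) ↔ words.Nodup := by
        unfold PySem.Set.len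
        rw [Int.natCast_inj, eq_comm]
        exact pv_ofList_length_iff_nodup words
      have hB : (pvDistinctAdj (PySem.List.sorted words (fun w => w) false) = true) ↔ words.Nodup :=
        (pv_distinctAdj_iff_chain _).trans (pv_sorted_chain_iff_nodup words)
      by_cases hnd : words.Nodup
      · rw [if_pos (hA.mpr hnd), if_pos (hB.mpr hnd), ih]
        ring
      · rw [if_neg (fun h => hnd (hA.mp h)), if_neg (fun h => hnd (hB.mp h)), ih]

-- ===== VERDICT (by name: the statement is the Claim_ definition above) =====
theorem day_four_spec : Claim_equal_day_four := by
  intro passphrases _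
  unfold Spec_day_four day_four day_four_alt
  rw [pv_fold_eq_go]
  ring
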